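-- pv_equiv track=rewrite | github.com/zainiss/ClosetIQ-elaboration | backend/prototype/recommendation_prototype.py | partition_into_slots
-- ===== SOURCE A (Python) =====
-- TOPS      = {'shirt', 'blouse', 'sweater', 'top', 't-shirt', 'tshirt', 'dress'}
--
-- BOTTOMS   = {'pants', 'jeans', 'shorts', 'skirt', 'leggings', 'trousers'}
--
-- SHOES     = {'shoes', 'boot', 'boots', 'sneaker', 'sneakers', 'heel', 'heels', 'loafer', 'sandal'}
--
-- OUTERWEAR = {'jacket', 'coat', 'blazer', 'hoodie', 'cardigan'}
--
-- def partition_into_slots(items):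
--     slots = {'top': [], 'bottom': [], 'shoes': [], 'outerwear': []}
--     for item in items:
--         cat = item['category'].lower()
--         if cat in TOPS:       slots['top'].append(item)
--         elif cat in BOTTOMS:  slots['bottom'].append(item)
--         elif cat in SHOES:    slots['shoes'].append(item)
--         elif cat in OUTERWEAR: slots['outerwear'].append(item)
--     return slots
-- ===== SOURCE B (Python) =====
-- CAT2SLOT = {
--     'shirt': 'top', 'blouse': 'top', 'sweater': 'top', 'top': 'top',
--     't-shirt': 'top', 'tshirt': 'top', 'dress': 'top',
--     'pants': 'bottom', 'jeans': 'bottom', 'shorts': 'bottom',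
--     'skirt': 'bottom', 'leggings': 'bottom', 'trousers': 'bottom',
--     'shoes': 'shoes', 'boot': 'shoes', 'boots': 'shoes', 'sneaker': 'shoes',
--     'sneakers': 'shoes', 'heel': 'shoes', 'heels': 'shoes',
--     'loafer': 'shoes', 'sandal': 'shoes',
--     'jacket': 'outerwear', 'coat': 'outerwear', 'blazer': 'outerwear',
--     'hoodie': 'outerwear', 'cardigan': 'outerwear',
-- }
--
-- def partition_into_slots(items):
--     return {slot: [it for it in items
--                    if CAT2SLOT.get(it['category'].lower()) == slot]
--             for slot in ('top', 'bottom', 'shoes', 'outerwear')}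
-- ===== Notes on version B (the rewrite author's own statement) =====
-- stated objective: simpler
-- what changed: Replaces the single loop with a four-way if/elif set-membership ladder and in-place appends by a flat category-to-slot reverse map and one filtering comprehension per slot (the result is built per slot, not per item).
import Mathlib
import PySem

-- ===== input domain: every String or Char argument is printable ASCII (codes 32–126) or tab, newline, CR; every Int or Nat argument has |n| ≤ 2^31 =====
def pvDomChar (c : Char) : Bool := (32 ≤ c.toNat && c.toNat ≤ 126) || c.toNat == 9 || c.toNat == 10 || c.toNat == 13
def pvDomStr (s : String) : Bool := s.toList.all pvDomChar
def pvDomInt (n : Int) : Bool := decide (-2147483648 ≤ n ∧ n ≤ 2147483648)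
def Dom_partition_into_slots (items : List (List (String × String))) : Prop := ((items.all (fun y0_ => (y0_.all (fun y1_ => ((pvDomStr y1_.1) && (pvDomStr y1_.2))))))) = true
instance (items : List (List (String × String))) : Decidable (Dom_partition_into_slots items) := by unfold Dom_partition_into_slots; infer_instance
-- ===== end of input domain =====

-- B replaces A's per-item if/elif set-membership ladder by a flat category→slot map and builds
-- each slot by one filter pass; same return value (return-value equivalence only; A returns a fresh dict, no argument is mutated).

-- ===== PORT A =====
def TOPS : List String := ["shirt", "blouse", "sweater", "top", "t-shirt", "tshirt", "dress"]
def BOTTOMS : List String := ["pants", "jeans", "shorts", "skirt", "leggings", "trousers"]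
def SHOES : List String := ["shoes", "boot", "boots", "sneaker", "sneakers", "heel", "heels", "loafer", "sandal"]
def OUTERWEAR : List String := ["jacket", "coat", "blazer", "hoodie", "cardigan"]

-- item['category'].lower(); Pre_ guarantees the key is present, so getD's default is never used
def pvCatOf (item : List (String × String)) : String :=
  PySem.Str.lower ((PySem.Dict.mk item).getD "category" "")

def partition_into_slots (items : List (List (String × String))) : List (String × List (List (String × String))) :=
  (items.foldl
    (fun (slots : PySem.Dict String (List (List (String × String)))) item =>
      let cat := pvCatOf item
      if cat ∈ TOPS then slots.modify "top" [] (· ++ [item])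
      else if cat ∈ BOTTOMS then slots.modify "bottom" [] (· ++ [item])
      else if cat ∈ SHOES then slots.modify "shoes" [] (· ++ [item])
      else if cat ∈ OUTERWEAR then slots.modify "outerwear" [] (· ++ [item])
      else slots)
    (PySem.Dict.mk [("top", []), ("bottom", []), ("shoes", []), ("outerwear", [])])).items

-- ===== PORT B =====
def CAT2SLOT : PySem.Dict String String := PySem.Dict.mk
  [("shirt", "top"), ("blouse", "top"), ("sweater", "top"), ("top", "top"),
   ("t-shirt", "top"), ("tshirt", "top"), ("dress", "top"),
   ("pants", "bottom"), ("jeans", "bottom"), ("shorts", "bottom"),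
   ("skirt", "bottom"), ("leggings", "bottom"), ("trousers", "bottom"),
   ("shoes", "shoes"), ("boot", "shoes"), ("boots", "shoes"), ("sneaker", "shoes"),
   ("sneakers", "shoes"), ("heel", "shoes"), ("heels", "shoes"),
   ("loafer", "shoes"), ("sandal", "shoes"),
   ("jacket", "outerwear"), ("coat", "outerwear"), ("blazer", "outerwear"),
   ("hoodie", "outerwear"), ("cardigan", "outerwear")]

def partition_into_slots_alt (items : List (List (String × String))) : List (String × List (List (String × String))) :=
  ["top", "bottom", "shoes", "outerwear"].map
    (fun slot => (slot, items.filter (fun it => CAT2SLOT.get? (pvCatOf it) == some slot)))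

-- ===== PRECONDITION & SPEC =====
-- Pre_ excludes only items lacking a 'category' key, on which A raises KeyError.
def Pre_partition_into_slots (items : List (List (String × String))) : Prop :=
  (items.all (fun it => (PySem.Dict.mk it).contains "category")) = true
instance (items : List (List (String × String))) : Decidable (Pre_partition_into_slots items) := by unfold Pre_partition_into_slots; infer_instance
def pvWitness_partition_into_slots : (List (List (String × String))) :=
  [[("category", "Shirt")], [("category", "jeans"), ("id", "3")], [("category", "hat")]]

def Spec_partition_into_slots (items : List (List (String × String))) (out : List (String × List (List (String × String)))) : Prop := out = partition_into_slots_alt items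
instance (items : List (List (String × String))) (out : List (String × List (List (String × String)))) : Decidable (Spec_partition_into_slots items out) := by unfold Spec_partition_into_slots; infer_instance

-- ===== CLAIM (what is proved, stated in full; the proofs are below) =====
def Claim_equal_partition_into_slots : Prop := ∀ (items : List (List (String × String))), Dom_partition_into_slots items → Pre_partition_into_slots items → Spec_partition_into_slots items (partition_into_slots items)

-- ===== LEMMAS AND PROOFS =====

lemma get_top {c : String} (h : c ∈ TOPS) : CAT2SLOT.get? c = some "top" := by
  simp only [TOPS] at h; fin_cases h <;> rfl

lemma get_bottom {c : String} (h : c ∈ BOTTOMS) : CAT2SLOT.get? c = some "bottom" := by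
  simp only [BOTTOMS] at h; fin_cases h <;> rfl

lemma get_shoes {c : String} (h : c ∈ SHOES) : CAT2SLOT.get? c = some "shoes" := by
  simp only [SHOES] at h; fin_cases h <;> rfl

lemma get_outer {c : String} (h : c ∈ OUTERWEAR) : CAT2SLOT.get? c = some "outerwear" := by
  simp only [OUTERWEAR] at h; fin_cases h <;> rfl

lemma get_none {c : String} (h1 : c ∉ TOPS) (h2 : c ∉ BOTTOMS) (h3 : c ∉ SHOES)
    (h4 : c ∉ OUTERWEAR) : CAT2SLOT.get? c = none := by
  rw [PySem.Dict.get?_eq_none_iff_not_mem_keys]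
  simp [TOPS, BOTTOMS, SHOES, OUTERWEAR, CAT2SLOT] at *
  tauto

lemma loop_invariant (items : List (List (String × String))) (a b c d : List (List (String × String))) :
    (items.foldl
      (fun (slots : PySem.Dict String (List (List (String × String)))) item =>
        let cat := pvCatOf item
        if cat ∈ TOPS then slots.modify "top" [] (· ++ [item])
        else if cat ∈ BOTTOMS then slots.modify "bottom" [] (· ++ [item])
        else if cat ∈ SHOES then slots.modify "shoes" [] (· ++ [item])
        else if cat ∈ OUTERWEAR then slots.modify "outerwear" [] (· ++ [item])
        else slots)
      (PySem.Dict.mk [("top", a), ("bottom", b), ("shoes", c), ("outerwear", d)])).items =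
    [("top", a ++ items.filter (fun it => CAT2SLOT.get? (pvCatOf it) == some "top")),
     ("bottom", b ++ items.filter (fun it => CAT2SLOT.get? (pvCatOf it) == some "bottom")),
     ("shoes", c ++ items.filter (fun it => CAT2SLOT.get? (pvCatOf it) == some "shoes")),
     ("outerwear", d ++ items.filter (fun it => CAT2SLOT.get? (pvCatOf it) == some "outerwear"))] := by
  induction items generalizing a b c d with
  | nil => simp
  | cons x xs ih =>
    simp only [List.foldl_cons, List.filter_cons]
    by_cases h1 : pvCatOf x ∈ TOPS
    · rw [if_pos h1, show (PySem.Dict.mk [("top", a), ("bottom", b), ("shoes", c), ("outerwear", d)]).modify "top" [] (· ++ [x])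
          = PySem.Dict.mk [("top", a ++ [x]), ("bottom", b), ("shoes", c), ("outerwear", d)] from by
        simp [PySem.Dict.modify, PySem.Dict.insert, PySem.Dict.getD, PySem.Dict.get?, PySem.Dict.contains], ih]
      simp [get_top h1]
    rw [if_neg h1]
    by_cases h2 : pvCatOf x ∈ BOTTOMS
    · rw [if_pos h2, show (PySem.Dict.mk [("top", a), ("bottom", b), ("shoes", c), ("outerwear", d)]).modify "bottom" [] (· ++ [x])
          = PySem.Dict.mk [("top", a), ("bottom", b ++ [x]), ("shoes", c), ("outerwear", d)] from by
        simp [PySem.Dict.modify, PySem.Dict.insert, PySem.Dict.getD, PySem.Dict.get?, PySem.Dict.contains], ih]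
      simp [get_bottom h2]
    rw [if_neg h2]
    by_cases h3 : pvCatOf x ∈ SHOES
    · rw [if_pos h3, show (PySem.Dict.mk [("top", a), ("bottom", b), ("shoes", c), ("outerwear", d)]).modify "shoes" [] (· ++ [x])
          = PySem.Dict.mk [("top", a), ("bottom", b), ("shoes", c ++ [x]), ("outerwear", d)] from by
        simp [PySem.Dict.modify, PySem.Dict.insert, PySem.Dict.getD, PySem.Dict.get?, PySem.Dict.contains], ih]
      simp [get_shoes h3]
    rw [if_neg h3]
    by_cases h4 : pvCatOf x ∈ OUTERWEAR
    · rw [if_pos h4, show (PySem.Dict.mk [("top", a), ("bottom", b), ("shoes", c), ("outerwear", d)]).modify "outerwear" [] (· ++ [x])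
          = PySem.Dict.mk [("top", a), ("bottom", b), ("shoes", c), ("outerwear", d ++ [x])] from by
        simp [PySem.Dict.modify, PySem.Dict.insert, PySem.Dict.getD, PySem.Dict.get?, PySem.Dict.contains], ih]
      simp [get_outer h4]
    rw [if_neg h4, ih]
    simp [get_none h1 h2 h3 h4]

-- ===== VERDICT (by name: the statement is the Claim_ definition above) =====
theorem partition_into_slots_spec : Claim_equal_partition_into_slots := by
  intro items _ _
  unfold Spec_partition_into_slots partition_into_slots partition_into_slots_alt
  simp [loop_invariant items [] [] [] []]
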